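-- pv_equiv track=rewrite | github.com/UnderCoverTable/University | OOP-Python_Lab-Work/LAB_3/231488347_COMP 111 B_LAB_3.py | capitals
-- ===== SOURCE A (Python) =====
-- def capitals(st):
--     cap_letters=""
--     if st=="":
--         return st
--     else:
--         if st[len(st)-1].isupper():
--             cap_letters=cap_letters+st[len(st)-1]
--         return cap_letters+capitals(st[:-1])
-- ===== SOURCE B (Python) =====
-- def capitals(st):
--     out = []
--     for c in reversed(st):
--         if c.isupper():
--             out.append(c)
--     return "".join(out)
-- ===== Notes on version B (the rewrite author's own statement) =====
-- stated objective: faster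
-- what changed: Replaces A's recursion on a shrinking slice (each step copies st[:-1], quadratic work and deep recursion) with a single iterative pass over reversed(st) accumulating uppercase characters into a list joined once.
import Mathlib
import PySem

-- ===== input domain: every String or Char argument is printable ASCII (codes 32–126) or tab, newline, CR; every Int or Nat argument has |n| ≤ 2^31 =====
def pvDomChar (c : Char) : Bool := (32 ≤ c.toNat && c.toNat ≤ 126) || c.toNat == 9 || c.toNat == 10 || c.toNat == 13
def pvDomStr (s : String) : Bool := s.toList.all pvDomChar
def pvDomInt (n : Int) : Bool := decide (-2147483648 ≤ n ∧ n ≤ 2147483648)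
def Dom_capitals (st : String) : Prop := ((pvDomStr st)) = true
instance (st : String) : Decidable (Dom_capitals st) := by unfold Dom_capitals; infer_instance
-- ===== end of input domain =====

-- B replaces A's recursion on a shrinking slice with one iterative pass over the reversed string (simpler decomposition).


-- ===== PORT A =====
-- A's recursion: if st = "" return st; else take the LAST char (st[len(st)-1]),
-- keep it if uppercase, and recurse on st[:-1] (= dropLast).
def capitalsAux : List Char → List Char
  | [] => []
  | c :: cs =>
      (if PySem.Chars.isupper ((c :: cs).getLast (by simp)) then [(c :: cs).getLast (by simp)] else [])
        ++ capitalsAux (c :: cs).dropLast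
termination_by l => l.length
decreasing_by simp

def capitals (st : String) : String := String.ofList (capitalsAux st.toList)

-- ===== PORT B =====
-- B: fold over the reversed character list, appending each uppercase char to the accumulator.
def capitals_alt (st : String) : String :=
  String.ofList (st.toList.reverse.foldl
    (fun acc c => if PySem.Chars.isupper c then acc ++ [c] else acc) [])

-- ===== PRECONDITION & SPEC =====
def Spec_capitals (st : String) (out : String) : Prop := out = capitals_alt st
instance (st : String) (out : String) : Decidable (Spec_capitals st out) := by unfold Spec_capitals; infer_instance

-- ===== CLAIM (what is proved, stated in full; the proofs are below) =====
def Claim_equal_capitals : Prop := ∀ (st : String), Dom_capitals st → Spec_capitals st (capitals st)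

-- ===== LEMMAS AND PROOFS =====
theorem capitalsAux_eq (l : List Char) :
    capitalsAux l = l.reverse.filter PySem.Chars.isupper := by
  induction l using List.reverseRecOn with
  | nil => rw [capitalsAux]; simp
  | append_singleton xs a ih =>
      obtain ⟨c, cs, hx⟩ : ∃ c cs, xs ++ [a] = c :: cs := by
        cases xs with
        | nil => exact ⟨a, [], rfl⟩
        | cons y ys => exact ⟨y, ys ++ [a], rfl⟩
      rw [hx, capitalsAux]
      simp only [← hx]
      simp [ih, List.filter_cons]
      split <;> simp

theorem foldl_upper (l : List Char) (acc : List Char) :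
    l.foldl (fun acc c => if PySem.Chars.isupper c then acc ++ [c] else acc) acc
      = acc ++ l.filter PySem.Chars.isupper := by
  induction l generalizing acc with
  | nil => simp
  | cons c l ih =>
      simp only [List.foldl_cons, List.filter_cons, ih]
      split <;> simp

-- ===== VERDICT (by name: the statement is the Claim_ definition above) =====
theorem capitals_spec : Claim_equal_capitals := by
  intro st _
  unfold Spec_capitals capitals capitals_alt
  rw [capitalsAux_eq, foldl_upper]
  simp
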